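-- pv_equiv track=rewrite | github.com/wyk18703232953/myResearch | codeComplex/data copy/onlyCode/python/quadratic/python_quadratic_0408.py | fn
-- ===== SOURCE A (Python) =====
-- def fn(string, k):
--     maximum_match = 0
--     for i in range(1, len(string)):
--         if string[:i] == string[-i:]:
--             maximum_match = i
--
--     answer = list(string)
--     extra = list(string[maximum_match:])
--     for i in range(k-1):
--         answer.extend(extra)
--
--     return ''.join(answer)
-- ===== SOURCE B (Python) =====
-- def fn(string, k):
--     # KMP failure function: longest proper border in O(n) instead of A's quadratic scan
--     n = len(string)
--     m = 0
--     if n: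
--         fail = [0]
--         j = 0
--         for i in range(1, n):
--             while j > 0 and string[i] != string[j]:
--                 j = fail[j - 1]
--             if string[i] == string[j]:
--                 j += 1
--             fail.append(j)
--         m = fail[-1]
--     return string + string[m:] * (k - 1)
-- ===== Notes on version B (the rewrite author's own statement) =====
-- stated objective: faster
-- what changed: B computes the longest proper border with the KMP failure function in linear time instead of A's quadratic scan comparing every prefix against every suffix, and builds the result with string repetition instead of a k-iteration extend loop.
import Mathlib
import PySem

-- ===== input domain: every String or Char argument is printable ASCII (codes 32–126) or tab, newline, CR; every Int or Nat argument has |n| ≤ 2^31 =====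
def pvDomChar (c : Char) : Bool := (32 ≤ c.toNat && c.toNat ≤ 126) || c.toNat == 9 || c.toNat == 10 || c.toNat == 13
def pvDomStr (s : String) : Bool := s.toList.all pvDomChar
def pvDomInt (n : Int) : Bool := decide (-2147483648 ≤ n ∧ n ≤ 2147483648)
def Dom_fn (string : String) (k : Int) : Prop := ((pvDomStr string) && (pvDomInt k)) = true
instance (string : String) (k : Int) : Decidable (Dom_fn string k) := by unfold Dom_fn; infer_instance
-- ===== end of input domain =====

-- B replaces A's O(n^2) all-prefix/suffix scan by the O(n) KMP failure function (same return value).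

-- ===== PORT A =====
def fn (string : String) (k : Int) : String :=
  let cs := string.toList
  let n : Int := cs.length
  let maximum_match : Int :=
    (PySem.List.pyRange 1 n 1).foldl
      (fun m i =>
        if PySem.List.slice cs none (some i) = PySem.List.slice cs (some (-i)) none then i else m) 0
  let answer := cs
  let extra := PySem.List.slice cs (some maximum_match) none
  let answer := (PySem.List.pyRange 0 (k - 1) 1).foldl (fun acc _ => acc ++ extra) answer
  String.ofList answer

-- ===== PORT B =====
-- the `while j > 0 and string[i] != string[j]` loop; fuel = starting j suffices (j strictly decreases)
def kmpWhile (cs : List Char) (fail : List Nat) (c : Char) : Nat → Nat → Nat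
  | 0, j => j
  | fuel + 1, j =>
      if 0 < j ∧ c ≠ cs.getD j ' ' then kmpWhile cs fail c fuel (fail.getD (j - 1) 0) else j

-- one iteration of `for i in range(1, n)` of Source B
def kmpStep (cs : List Char) (st : List Nat × Nat) (i : Nat) : List Nat × Nat :=
  let c := cs.getD i ' '
  let j := kmpWhile cs st.1 c st.2 st.2
  let j := if c = cs.getD j ' ' then j + 1 else j
  (st.1 ++ [j], j)

def fn_alt (string : String) (k : Int) : String :=
  let cs := string.toList
  let n := cs.length
  let m : Nat :=
    if n ≠ 0 then
      (((List.range' 1 (n - 1)).foldl (kmpStep cs) ([0], 0)).1.getLast?).getD 0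
    else 0
  String.ofList (cs ++ (List.replicate (k - 1).toNat (cs.drop m)).flatten)

-- ===== PRECONDITION & SPEC =====
def Spec_fn (string : String) (k : Int) (out : String) : Prop := out = fn_alt string k
instance (string : String) (k : Int) (out : String) : Decidable (Spec_fn string k out) := by unfold Spec_fn; infer_instance

-- ===== CLAIM (what is proved, stated in full; the proofs are below) =====
def Claim_equal_fn : Prop := ∀ (string : String) (k : Int), Dom_fn string k → Spec_fn string k (fn string k)

-- ===== LEMMAS AND PROOFS =====

-- `j` is a proper border length of the prefix of cs of length p
def pvBrd (cs : List Char) (p j : Nat) : Prop :=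
  j < p ∧ cs.take j = (cs.take p).drop (p - j)

-- longest proper border length of the prefix of length p
def pvLb (cs : List Char) (p : Nat) : Nat :=
  Nat.findGreatest (fun j => cs.take j = (cs.take p).drop (p - j)) (p - 1)

lemma pvBrd_zero (cs : List Char) (p : Nat) (hp : 0 < p) : pvBrd cs p 0 := by
  refine ⟨hp, ?_⟩
  have : (cs.take p).length ≤ p - 0 := by simp
  exact (List.drop_eq_nil_iff.mpr this).symm

lemma pvLb_brd (cs : List Char) (p : Nat) (hp : 0 < p) : pvBrd cs p (pvLb cs p) := by
  refine ⟨?_, ?_⟩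
  · have := Nat.findGreatest_le (P := fun j => cs.take j = (cs.take p).drop (p - j)) (n := p - 1)
    unfold pvLb; omega
  · exact Nat.findGreatest_spec (P := fun j => cs.take j = (cs.take p).drop (p - j))
      (Nat.zero_le _) (pvBrd_zero cs p hp).2

lemma pvLb_ge (cs : List Char) (p j : Nat) (h : pvBrd cs p j) : j ≤ pvLb cs p := by
  have h1 := h.1
  exact Nat.le_findGreatest (by omega) h.2

lemma pvBrd_trans (cs : List Char) (p j i : Nat) (h1 : pvBrd cs p j) (h2 : pvBrd cs j i) :
    pvBrd cs p i := by
  obtain ⟨hj, e1⟩ := h1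
  obtain ⟨hi, e2⟩ := h2
  refine ⟨by omega, ?_⟩
  rw [e2, e1, List.drop_drop]
  congr 1
  omega

lemma pvBrd_chain (cs : List Char) (p i j : Nat) (h1 : pvBrd cs p i) (h2 : pvBrd cs p j)
    (hij : i < j) : pvBrd cs j i := by
  obtain ⟨hi, e1⟩ := h1
  obtain ⟨hj, e2⟩ := h2
  refine ⟨hij, ?_⟩
  rw [e2, List.drop_drop, e1]
  congr 1
  omega

lemma take_succ_getD (cs : List Char) (m : Nat) (h : m < cs.length) :
    cs.take (m + 1) = cs.take m ++ [cs.getD m ' '] := by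
  rw [List.take_add_one, List.getElem?_eq_getElem h, List.getD_eq_getElem cs ' ' h]
  rfl

lemma pvBrd_succ (cs : List Char) (p m : Nat) (hpn : p < cs.length) (hm : 0 < m) :
    pvBrd cs (p + 1) m ↔ (pvBrd cs p (m - 1) ∧ cs.getD (m - 1) ' ' = cs.getD p ' ') := by
  constructor
  · rintro ⟨hlt, he⟩
    have hm1 : m - 1 < cs.length := by omega
    rw [take_succ_getD cs p hpn,
        List.drop_append_of_le_length (by rw [List.length_take]; omega)] at he
    rw [show m = (m - 1) + 1 by omega, take_succ_getD cs (m - 1) hm1] at he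
    have h2 := List.append_inj' he rfl
    refine ⟨⟨by omega, ?_⟩, by simpa using h2.2⟩
    rw [h2.1]
    congr 1
    omega
  · rintro ⟨⟨hlt, he⟩, hc⟩
    have hm1 : m - 1 < cs.length := by omega
    refine ⟨by omega, ?_⟩
    rw [take_succ_getD cs p hpn,
        List.drop_append_of_le_length (by rw [List.length_take]; omega)]
    rw [show m = (m - 1) + 1 by omega, take_succ_getD cs (m - 1) hm1, he, hc]
    congr 2
    omega

lemma pvLb_succ (cs : List Char) (p r : Nat) (hp : 0 < p) (hpn : p < cs.length)
    (hr : pvBrd cs p r) (hstop : r = 0 ∨ cs.getD r ' ' = cs.getD p ' ')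
    (hmax : ∀ j, pvBrd cs p j → cs.getD j ' ' = cs.getD p ' ' → j ≤ r) :
    pvLb cs (p + 1) = if cs.getD r ' ' = cs.getD p ' ' then r + 1 else r := by
  by_cases hcr : cs.getD r ' ' = cs.getD p ' '
  · rw [if_pos hcr]
    apply le_antisymm
    · have hb := pvLb_brd cs (p + 1) (by omega)
      have hpos : 0 < pvLb cs (p + 1) := by
        have h1 : pvBrd cs (p + 1) (r + 1) :=
          (pvBrd_succ cs p (r + 1) hpn (by omega)).mpr ⟨hr, hcr⟩
        have := pvLb_ge _ _ _ h1
        omega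
      have h2 := (pvBrd_succ cs p _ hpn hpos).mp hb
      have := hmax _ h2.1 h2.2
      omega
    · exact pvLb_ge _ _ _ ((pvBrd_succ cs p (r + 1) hpn (by omega)).mpr ⟨hr, hcr⟩)
  · rw [if_neg hcr]
    have hr0 : r = 0 := Or.resolve_right hstop hcr
    subst hr0
    rcases Nat.eq_zero_or_pos (pvLb cs (p + 1)) with hz | hpos
    · exact hz
    · exfalso
      have hb := pvLb_brd cs (p + 1) (by omega)
      have h2 := (pvBrd_succ cs p _ hpn hpos).mp hb
      have h3 := hmax _ h2.1 h2.2
      have h4 : pvLb cs (p + 1) - 1 = 0 := by omega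
      rw [h4] at h2
      exact hcr h2.2

lemma kmpWhile_spec (cs : List Char) (fail : List Nat) (p : Nat) (_hp : 0 < p)
    (hfail : ∀ t, t < p → fail.getD t 0 = pvLb cs (t + 1)) :
    ∀ (fuel j : Nat), j ≤ fuel → pvBrd cs p j →
      (∀ j', pvBrd cs p j' → cs.getD j' ' ' = cs.getD p ' ' → j' ≤ j) →
      pvBrd cs p (kmpWhile cs fail (cs.getD p ' ') fuel j) ∧
      (kmpWhile cs fail (cs.getD p ' ') fuel j = 0 ∨
        cs.getD (kmpWhile cs fail (cs.getD p ' ') fuel j) ' ' = cs.getD p ' ') ∧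
      (∀ j', pvBrd cs p j' → cs.getD j' ' ' = cs.getD p ' ' →
        j' ≤ kmpWhile cs fail (cs.getD p ' ') fuel j) := by
  intro fuel
  induction fuel with
  | zero =>
    intro j hj hbrd hmax
    have hj0 : j = 0 := by omega
    subst hj0
    exact ⟨hbrd, Or.inl rfl, hmax⟩
  | succ f ih =>
    intro j hj hbrd hmax
    rw [kmpWhile]
    by_cases hcond : 0 < j ∧ cs.getD p ' ' ≠ cs.getD j ' '
    · rw [if_pos hcond]
      have hjp : j < p := hbrd.1
      have hfa := hfail (j - 1) (by omega)
      rw [show j - 1 + 1 = j by omega] at hfa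
      rw [hfa]
      have hlbj := pvLb_brd cs j (by omega)
      have hlt : pvLb cs j < j := hlbj.1
      apply ih
      · omega
      · exact pvBrd_trans cs p j _ hbrd hlbj
      · intro j' hj' hc'
        have hle := hmax j' hj' hc'
        rcases lt_or_eq_of_le hle with h | h
        · exact pvLb_ge _ _ _ (pvBrd_chain cs p j' j hj' hbrd h)
        · exact absurd (h ▸ hc').symm hcond.2
    · rw [if_neg hcond]
      refine ⟨hbrd, ?_, hmax⟩
      by_cases hj0 : j = 0
      · exact Or.inl hj0
      · right
        by_contra hne
        exact hcond ⟨by omega, fun h => hne h.symm⟩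

lemma getD_map_range (f : Nat → Nat) (n k : Nat) (h : k < n) :
    (((List.range n).map f).getD k 0) = f k := by
  rw [List.getD_eq_getElem?_getD]
  simp [List.getElem?_map, List.getElem?_range h]

lemma flatMap_const_eq (l : List Int) (e : List Char) :
    l.flatMap (fun _ => e) = (List.replicate l.length e).flatten := by
  induction l with
  | nil => rfl
  | cons x xs ih => simp only [List.flatMap_cons, List.length_cons, List.replicate_succ,
      List.flatten_cons, ih]

lemma kmp_inv (cs : List Char) :
    ∀ i : Nat, i + 1 ≤ cs.length →
      ((List.range' 1 i).foldl (kmpStep cs) ([0], 0)).1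
          = (List.range (i + 1)).map (fun t => pvLb cs (t + 1)) ∧
      ((List.range' 1 i).foldl (kmpStep cs) ([0], 0)).2 = pvLb cs (i + 1) := by
  intro i
  induction i with
  | zero =>
    intro _
    constructor
    · simp [List.range', List.range_succ, pvLb]
    · simp [List.range', pvLb]
  | succ i ih =>
    intro h
    obtain ⟨ih1, ih2⟩ := ih (by omega)
    rw [List.range'_concat]
    simp only [one_mul, List.foldl_append, List.foldl_cons, List.foldl_nil]
    rw [show 1 + i = i + 1 by omega]
    set st := (List.range' 1 i 1).foldl (kmpStep cs) ([0], 0) with hst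
    have hfail : ∀ t, t < i + 1 → st.1.getD t 0 = pvLb cs (t + 1) := by
      intro t ht
      rw [ih1, getD_map_range _ _ _ ht]
    have hbrd0 : pvBrd cs (i + 1) st.2 := by
      rw [ih2]; exact pvLb_brd cs (i + 1) (by omega)
    have hmax0 : ∀ j', pvBrd cs (i + 1) j' →
        cs.getD j' ' ' = cs.getD (i + 1) ' ' → j' ≤ st.2 := by
      intro j' hj' _
      rw [ih2]; exact pvLb_ge _ _ _ hj'
    obtain ⟨hbr, hstop, hmx⟩ :=
      kmpWhile_spec cs st.1 (i + 1) (by omega) hfail st.2 st.2 le_rfl hbrd0 hmax0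
    simp only [kmpStep]
    set r := kmpWhile cs st.1 (cs.getD (i + 1) ' ') st.2 st.2 with hr
    have hlb : pvLb cs (i + 1 + 1)
        = if cs.getD (i + 1) ' ' = cs.getD r ' ' then r + 1 else r := by
      rw [pvLb_succ cs (i + 1) r (by omega) (by omega) hbr hstop hmx]
      exact (if_congr (Iff.intro Eq.symm Eq.symm) rfl rfl).symm
    constructor
    · rw [ih1, ← hlb, List.range_succ (n := i + 1), List.map_append]
      rfl
    · exact hlb.symm

lemma fn_fold_max (cs : List Char) (b : Nat) :
    (PySem.List.pyRange 1 ((b : Int) + 1) 1).foldl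
      (fun m i =>
        if PySem.List.slice cs none (some i) = PySem.List.slice cs (some (-i)) none then i else m) 0
      = ((Nat.findGreatest (fun j => cs.take j = cs.drop (cs.length - j)) b : Nat) : Int) := by
  induction b with
  | zero =>
    rw [show ((0 : Nat) : Int) + 1 = 1 by norm_num, PySem.List.pyRange_one_eq_nil (by omega)]
    simp
  | succ b ih =>
    rw [show (((b + 1 : Nat)) : Int) + 1 = ((b : Int) + 1) + 1 by push_cast; ring,
        PySem.List.pyRange_one_succ_right (by omega), List.foldl_append, List.foldl_cons,
        List.foldl_nil, ih,
        show ((b : Int) + 1) = (((b + 1 : Nat)) : Int) by push_cast; ring,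
        PySem.List.slice_to_natCast, PySem.List.slice_from_neg_natCast cs (b + 1) (by omega),
        Nat.findGreatest_succ]
    split_ifs with h
    · rfl
    · rfl

lemma pvLb_norm (cs : List Char) :
    pvLb cs cs.length
      = Nat.findGreatest (fun j => cs.take j = cs.drop (cs.length - j)) (cs.length - 1) := by
  simp [pvLb, List.take_length]

lemma fn_alt_m (cs : List Char) (hn : 0 < cs.length) :
    ((((List.range' 1 (cs.length - 1)).foldl (kmpStep cs) ([0], 0)).1.getLast?).getD 0)
      = pvLb cs cs.length := by
  obtain ⟨h1, _⟩ := kmp_inv cs (cs.length - 1) (by omega)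
  rw [h1, show cs.length - 1 + 1 = cs.length by omega,
      show cs.length = (cs.length - 1) + 1 by omega, List.range_succ, List.map_append,
      List.map_cons, List.map_nil, List.getLast?_concat]
  rfl

-- ===== VERDICT (by name: the statement is the Claim_ definition above) =====
theorem fn_spec : Claim_equal_fn := by
  intro s k _
  simp only [Spec_fn, fn, fn_alt]
  by_cases hn : s.toList.length = 0
  · have hnil : s.toList = [] := List.length_eq_zero_iff.mp hn
    rw [hnil]
    simp [PySem.List.pyRange_one_eq_nil]
  · simp only [ne_eq]
    rw [if_pos hn, fn_alt_m s.toList (by omega)]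
    have hA := fn_fold_max s.toList (s.toList.length - 1)
    rw [show ((s.toList.length - 1 : Nat) : Int) + 1 = (s.toList.length : Int) by omega] at hA
    rw [hA, ← pvLb_norm, PySem.List.slice_from_natCast,
        PySem.List.foldl_append_eq_flatMap, flatMap_const_eq, PySem.List.length_pyRange_one,
        show (k - 1 - 0 : Int) = k - 1 by ring]
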